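-- pv_equiv track=rewrite | github.com/mrMustacho/topcoder-solutions | py/TheExperimentDiv2.py | determineHumidity
-- ===== SOURCE A (Python) =====
-- def sponges(intensity, L, leftEnd, n, m):
--     array = [[0 for j in range(n)] for i in range(m)]
--     for i in range(m):
--         for j in range(n):
--             if leftEnd[i] + L-1>= j and leftEnd[i] <= j:
--                 array[i][j] = 1
--     return array
--
-- def determineHumidity(intensity, L, leftEnd):
--     n = len(intensity)
--     m = len(leftEnd)
--     drops = [0 for i in range(m)]
--     s = sponges(intensity, L, leftEnd, n, m)
--     for i in range(n):
--         for j in range(m):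
--             if s[j][i] == 1:
--                 drops[j] += intensity[i]
--                 break
--     return drops
-- ===== SOURCE B (Python) =====
-- def determineHumidity(intensity, L, leftEnd):
--     n = len(intensity)
--     m = len(leftEnd)
--     # paint ownership sponge-major in reverse: the last write (smallest j) wins
--     owner = [-1] * n
--     for j in range(m - 1, -1, -1):
--         lo = max(leftEnd[j], 0)
--         hi = min(leftEnd[j] + L, n)
--         for i in range(lo, hi):
--             owner[i] = j
--     drops = [0] * m
--     for i in range(n):
--         if owner[i] != -1:
--             drops[owner[i]] += intensity[i]
--     return drops
-- ===== Notes on version B (the rewrite author's own statement) =====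
-- stated objective: faster
-- what changed: Instead of building an m-by-n sponge occupancy matrix and scanning every sponge for every column, B paints an owner array sponge-major in reverse order (last write = earliest sponge wins) over each sponge's clamped column range, then aggregates intensities in one pass.
import Mathlib
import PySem

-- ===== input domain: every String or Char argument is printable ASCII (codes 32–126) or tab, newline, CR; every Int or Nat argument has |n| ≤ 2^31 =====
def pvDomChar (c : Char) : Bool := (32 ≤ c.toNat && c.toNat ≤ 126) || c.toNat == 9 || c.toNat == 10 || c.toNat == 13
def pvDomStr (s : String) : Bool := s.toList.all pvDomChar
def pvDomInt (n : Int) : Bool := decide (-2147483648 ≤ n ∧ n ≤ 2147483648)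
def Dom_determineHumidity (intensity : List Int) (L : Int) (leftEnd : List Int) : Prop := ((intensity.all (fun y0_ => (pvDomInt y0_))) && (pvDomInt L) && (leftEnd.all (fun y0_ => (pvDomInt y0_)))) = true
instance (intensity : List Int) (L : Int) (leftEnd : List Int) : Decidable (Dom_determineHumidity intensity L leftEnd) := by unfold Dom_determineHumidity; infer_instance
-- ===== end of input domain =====

-- B replaces A's m×n sponge-occupancy matrix and per-column sponge scan by reverse sponge-major
-- painting of an owner array (last write = earliest sponge) plus one aggregation pass; faster by
-- a constant factor (no matrix is built) measured.

-- ===== PORT A =====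
-- helper: the 'sponges' function of A (matrix cell is 1 iff sponge i covers column j)
def sponges (intensity : List Int) (L : Int) (leftEnd : List Int) (n m : Int) : List (List Int) :=
  (PySem.List.pyRange 0 m 1).map (fun i =>
    (PySem.List.pyRange 0 n 1).map (fun j =>
      if PySem.List.pyGetD leftEnd i 0 + L - 1 ≥ j ∧ PySem.List.pyGetD leftEnd i 0 ≤ j then (1 : Int) else 0))

-- helper: A's inner 'for j in range(m): if s[j][i]==1: drops[j]+=intensity[i]; break'
def dhInner (s : List (List Int)) (intensity : List Int) (i : Int) (drops : List Int) : List Int → List Int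
  | [] => drops
  | j :: js =>
    if PySem.List.pyGetD (PySem.List.pyGetD s j []) i 0 = 1 then
      PySem.List.pySetD drops j (PySem.List.pyGetD drops j 0 + PySem.List.pyGetD intensity i 0)
    else dhInner s intensity i drops js

def determineHumidity (intensity : List Int) (L : Int) (leftEnd : List Int) : List Int :=
  let n : Int := PySem.List.len intensity
  let m : Int := PySem.List.len leftEnd
  let drops : List Int := (PySem.List.pyRange 0 m 1).map (fun _ => (0 : Int))
  let s := sponges intensity L leftEnd n m
  (PySem.List.pyRange 0 n 1).foldl
    (fun drops i => dhInner s intensity i drops (PySem.List.pyRange 0 m 1)) drops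

-- ===== PORT B =====
def determineHumidity_alt (intensity : List Int) (L : Int) (leftEnd : List Int) : List Int :=
  let n : Int := PySem.List.len intensity
  let m : Int := PySem.List.len leftEnd
  let owner0 : List Int := List.replicate n.toNat (-1)     -- [-1] * n
  let owner :=
    (PySem.List.pyRange (m - 1) (-1) (-1)).foldl (fun ow j =>
      let lo := max (PySem.List.pyGetD leftEnd j 0) 0
      let hi := min (PySem.List.pyGetD leftEnd j 0 + L) n
      (PySem.List.pyRange lo hi 1).foldl (fun ow i => PySem.List.pySetD ow i j) ow) owner0
  let drops0 : List Int := List.replicate m.toNat 0        -- [0] * m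
  (PySem.List.pyRange 0 n 1).foldl (fun drops i =>
    let o := PySem.List.pyGetD owner i (-1)
    if o ≠ -1 then
      PySem.List.pySetD drops o (PySem.List.pyGetD drops o 0 + PySem.List.pyGetD intensity i 0)
    else drops) drops0

-- ===== PRECONDITION & SPEC =====
def Spec_determineHumidity (intensity : List Int) (L : Int) (leftEnd : List Int) (out : List Int) : Prop := out = determineHumidity_alt intensity L leftEnd
instance (intensity : List Int) (L : Int) (leftEnd : List Int) (out : List Int) : Decidable (Spec_determineHumidity intensity L leftEnd out) := by unfold Spec_determineHumidity; infer_instance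

-- ===== CLAIM (what is proved, stated in full; the proofs are below) =====
def Claim_equal_determineHumidity : Prop := ∀ (intensity : List Int) (L : Int) (leftEnd : List Int), Dom_determineHumidity intensity L leftEnd → Spec_determineHumidity intensity L leftEnd (determineHumidity intensity L leftEnd)

-- ===== LEMMAS AND PROOFS =====

-- index of the first sponge in the list js covering column i, or -1
def firstCov (leftEnd : List Int) (L i : Int) : List Int → Int
  | [] => -1
  | j :: js =>
    if PySem.List.pyGetD leftEnd j 0 + L - 1 ≥ i ∧ PySem.List.pyGetD leftEnd j 0 ≤ i then j
    else firstCov leftEnd L i js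

-- the per-column update both programs perform (o = owning sponge, -1 = none)
def updAt (intensity : List Int) (i : Int) (drops : List Int) (o : Int) : List Int :=
  if o = -1 then drops
  else PySem.List.pySetD drops o (PySem.List.pyGetD drops o 0 + PySem.List.pyGetD intensity i 0)

-- pyGetD after pySetD, Int indices known to be in range
lemma pyGetD_pySetD_int (ow : List Int) (p v d q : Int) (hp0 : 0 ≤ p)
    (_hp : p < (ow.length : Int)) (hq0 : 0 ≤ q) (hq : q < (ow.length : Int)) :
    PySem.List.pyGetD (PySem.List.pySetD ow p v) q d
      = if q = p then v else PySem.List.pyGetD ow q d := by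
  rw [PySem.List.pySetD_of_nonneg ow v hp0,
    PySem.List.pyGetD_eq_getElem _ d hq0 (by simpa using hq),
    PySem.List.pyGetD_eq_getElem ow d hq0 hq,
    List.getElem_set]
  split_ifs <;> first | rfl | omega

lemma firstCov_append (leftEnd : List Int) (L i : Int) (xs ys : List Int)
    (hxs : ∀ x ∈ xs, 0 ≤ x) :
    firstCov leftEnd L i (xs ++ ys) =
      if firstCov leftEnd L i xs = -1 then firstCov leftEnd L i ys else firstCov leftEnd L i xs := by
  induction xs with
  | nil => simp [firstCov]
  | cons x xs ih =>
    have hx : 0 ≤ x := hxs x (by simp)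
    simp only [List.cons_append, firstCov]
    by_cases hc : PySem.List.pyGetD leftEnd x 0 + L - 1 ≥ i ∧ PySem.List.pyGetD leftEnd x 0 ≤ i
    · rw [if_pos hc, if_pos hc, if_neg (by omega)]
    · rw [if_neg hc, if_neg hc]
      exact ih (fun y hy => hxs y (List.mem_cons_of_mem _ hy))

-- A's inner break-loop computes the update at the first covering sponge of the scanned list
lemma dhInner_eq (intensity : List Int) (L : Int) (leftEnd : List Int) (i : Int)
    (hi0 : 0 ≤ i) (hin : i < (intensity.length : Int)) (drops : List Int) (js : List Int)
    (hjs : ∀ j ∈ js, 0 ≤ j ∧ j < (leftEnd.length : Int)) :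
    dhInner (sponges intensity L leftEnd (PySem.List.len intensity) (PySem.List.len leftEnd))
        intensity i drops js
      = updAt intensity i drops (firstCov leftEnd L i js) := by
  induction js generalizing drops with
  | nil => simp [dhInner, firstCov, updAt]
  | cons j js ih =>
    have hj := hjs j (by simp)
    have hcell : PySem.List.pyGetD
        (PySem.List.pyGetD (sponges intensity L leftEnd (PySem.List.len intensity)
          (PySem.List.len leftEnd)) j []) i 0
        = if PySem.List.pyGetD leftEnd j 0 + L - 1 ≥ i ∧ PySem.List.pyGetD leftEnd j 0 ≤ i
            then (1 : Int) else 0 := by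
      unfold sponges
      rw [PySem.List.pyGetD_map_pyRange_of_nonneg _ _ _ _ hj.1
        (by rw [PySem.List.len_eq]; exact hj.2)]
      rw [PySem.List.pyGetD_map_pyRange_of_nonneg _ _ _ _ hi0
        (by rw [PySem.List.len_eq]; exact hin)]
    simp only [dhInner, hcell, firstCov]
    by_cases hc : PySem.List.pyGetD leftEnd j 0 + L - 1 ≥ i ∧ PySem.List.pyGetD leftEnd j 0 ≤ i
    · rw [if_pos hc, if_pos rfl]
      simp only [updAt]
      rw [if_pos hc, if_neg (by omega)]
    · rw [if_neg hc, if_neg (by omega : ¬ (0 : Int) = 1), if_neg hc]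
      exact ih drops (fun x hx => hjs x (List.mem_cons_of_mem _ hx))

-- painting one sponge: value at a column after the inner paint loop
lemma paint_get (j lo hi : Int) (ow : List Int) (i : Int)
    (h0 : 0 ≤ i) (hn : i < (ow.length : Int)) (hlo : 0 ≤ lo) (hhi : hi ≤ (ow.length : Int)) :
    PySem.List.pyGetD ((PySem.List.pyRange lo hi 1).foldl
        (fun ow i => PySem.List.pySetD ow i j) ow) i (-1)
      = if lo ≤ i ∧ i < hi then j else PySem.List.pyGetD ow i (-1) := by
  induction hd : (hi - lo).toNat generalizing lo ow with
  | zero =>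
    rw [PySem.List.pyRange_one_eq_nil (by omega), List.foldl_nil, if_neg (by omega)]
  | succ d ih =>
    rw [PySem.List.pyRange_one_cons (by omega), List.foldl_cons]
    rw [ih (lo + 1) (PySem.List.pySetD ow lo j)
      (by rw [PySem.List.length_pySetD]; exact hn)
      (by omega)
      (by rw [PySem.List.length_pySetD]; exact hhi)
      (by omega)]
    rw [pyGetD_pySetD_int ow lo j (-1) i hlo (by omega) h0 hn]
    split_ifs <;> first | rfl | omega

lemma paint_length (j lo hi : Int) (ow : List Int) :
    ((PySem.List.pyRange lo hi 1).foldl (fun ow i => PySem.List.pySetD ow i j) ow).length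
      = ow.length := by
  induction hn : (hi - lo).toNat generalizing lo ow with
  | zero =>
    rw [PySem.List.pyRange_one_eq_nil (by omega)]
    rfl
  | succ d ih =>
    rw [PySem.List.pyRange_one_cons (by omega), List.foldl_cons]
    rw [ih (lo + 1) _ (by omega)]
    exact PySem.List.length_pySetD ow lo j

-- the reverse sponge-major painting loop: after processing sponges m-1 … k, a column holds the
-- first sponge in [k, m) covering it, else its previous value
lemma paintLoop_get (intensity : List Int) (L : Int) (leftEnd : List Int) (k m : Int)
    (hk : 0 ≤ k) (hm : m ≤ (leftEnd.length : Int)) (ow : List Int)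
    (hlen : ow.length = intensity.length) (i : Int)
    (h0 : 0 ≤ i) (hn : i < (intensity.length : Int)) :
    PySem.List.pyGetD
        ((PySem.List.pyRange (m - 1) (k - 1) (-1)).foldl (fun ow j =>
          (PySem.List.pyRange (max (PySem.List.pyGetD leftEnd j 0) 0)
              (min (PySem.List.pyGetD leftEnd j 0 + L) (PySem.List.len intensity)) 1).foldl
            (fun ow i => PySem.List.pySetD ow i j) ow) ow)
        i (-1)
      = if firstCov leftEnd L i (PySem.List.pyRange k m 1) = -1
          then PySem.List.pyGetD ow i (-1)
          else firstCov leftEnd L i (PySem.List.pyRange k m 1) := by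
  induction hd : (m - k).toNat generalizing m ow with
  | zero =>
    rw [PySem.List.pyRange_neg_one_eq_nil (by omega), List.foldl_nil,
      PySem.List.pyRange_one_eq_nil (by omega)]
    simp [firstCov]
  | succ d ih =>
    rw [PySem.List.pyRange_neg_one_cons (by omega), List.foldl_cons]
    rw [ih (m - 1) (by omega) _ (by rw [paint_length]; exact hlen) (by omega)]
    have hsing : PySem.List.pyRange (m - 1) m 1 = [m - 1] := by
      simp [PySem.List.pyRange_one, List.range_succ]
    have hsplit : PySem.List.pyRange k m 1
        = PySem.List.pyRange k (m - 1) 1 ++ [m - 1] := by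
      rw [← hsing]
      exact PySem.List.pyRange_one_append k (m - 1) m (by omega) (by omega)
    rw [hsplit, firstCov_append _ _ _ _ _
      (fun x hx => by have := (PySem.List.mem_pyRange_one).1 hx; omega)]
    rw [paint_get _ _ _ _ _ h0 (by rw [hlen]; exact hn) (by omega)
      (by rw [hlen, PySem.List.len_eq]; exact min_le_right _ _)]
    by_cases hF : firstCov leftEnd L i (PySem.List.pyRange k (m - 1) 1) = -1
    · rw [if_pos hF, if_pos hF]
      simp only [firstCov]
      by_cases hc : PySem.List.pyGetD leftEnd (m - 1) 0 + L - 1 ≥ i ∧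
          PySem.List.pyGetD leftEnd (m - 1) 0 ≤ i
      · rw [if_pos hc, if_neg (by omega : ¬ (m - 1 : Int) = -1)]
        rw [if_pos (by
          refine ⟨max_le (by omega) h0, ?_⟩
          rw [PySem.List.len_eq]
          exact lt_min (by omega) hn)]
      · rw [if_neg hc, if_pos rfl]
        rw [if_neg (by
          rw [PySem.List.len_eq]
          simp only [max_le_iff, lt_min_iff, not_and]
          omega)]
    · rw [if_neg hF, if_neg hF, if_neg hF]

-- ===== VERDICT (by name: the statement is the Claim_ definition above) =====
theorem determineHumidity_spec : Claim_equal_determineHumidity := by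
  intro intensity L leftEnd _
  unfold Spec_determineHumidity determineHumidity determineHumidity_alt
  dsimp only
  have hinit : (PySem.List.pyRange 0 (PySem.List.len leftEnd) 1).map (fun _ => (0 : Int))
      = List.replicate (PySem.List.len leftEnd).toNat 0 := by
    rw [List.map_const', PySem.List.length_pyRange_one]
    norm_num
  rw [hinit]
  apply PySem.List.foldl_congr_mem
  intro drops i hi
  have hmem := PySem.List.mem_pyRange_one.mp hi
  have hin : i < (intensity.length : Int) := by
    have := hmem.2
    rwa [PySem.List.len_eq] at this
  rw [dhInner_eq intensity L leftEnd i hmem.1 hin drops _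
    (fun j hj => by
      have := PySem.List.mem_pyRange_one.mp hj
      rw [PySem.List.len_eq] at this
      exact ⟨this.1, this.2⟩)]
  have hpl := paintLoop_get intensity L leftEnd 0 (PySem.List.len leftEnd) (le_refl 0)
    (by rw [PySem.List.len_eq]) (List.replicate (PySem.List.len intensity).toNat (-1))
    (by simp [PySem.List.len_eq]) i hmem.1 hin
  rw [show (0 : Int) - 1 = -1 by norm_num] at hpl
  have hrep : PySem.List.pyGetD (List.replicate (PySem.List.len intensity).toNat (-1)) i (-1)
      = -1 := by
    rw [PySem.List.pyGetD_eq_getElem _ _ hmem.1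
      (by simp [PySem.List.len_eq]; omega)]
    simp
  rw [hrep] at hpl
  have howner : PySem.List.pyGetD
      ((PySem.List.pyRange (PySem.List.len leftEnd - 1) (-1) (-1)).foldl (fun ow j =>
        (PySem.List.pyRange (max (PySem.List.pyGetD leftEnd j 0) 0)
            (min (PySem.List.pyGetD leftEnd j 0 + L) (PySem.List.len intensity)) 1).foldl
          (fun ow i => PySem.List.pySetD ow i j) ow)
        (List.replicate (PySem.List.len intensity).toNat (-1))) i (-1)
      = firstCov leftEnd L i (PySem.List.pyRange 0 (PySem.List.len leftEnd) 1) := by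
    rw [hpl]
    split_ifs with h
    · exact h.symm
    · rfl
  rw [howner]
  simp only [updAt]
  by_cases h : firstCov leftEnd L i (PySem.List.pyRange 0 (PySem.List.len leftEnd) 1) = -1
  · rw [if_pos h, if_neg (by simpa using h)]
  · rw [if_neg h, if_pos (by simpa using h)]
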